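-- pv_equiv track=rewrite | github.com/1nram1/CS61A | 2024exercise/lab/lab05/lab05/lab05.py | repeated_iterable
-- ===== SOURCE A (Python) =====
-- def repeated_iterable(t,k):
--     assert k > 1
--     last_item = t[0]
--     count = 1
--     length = len(t)
--     for i in range(1,length):
--         current_item = t[i]
--         if current_item == last_item:
--             count += 1
--             if count == k:
--                 return current_item
--         else:
--             count = 1
--             last_item = current_item
--     return None
-- ===== SOURCE B (Python) =====
-- def repeated_iterable(t, k):
--     assert k > 1
--     i, n = 0, len(t)
--     while i < n:
--         j = i
--         while j < n and t[j] == t[i]: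
--             j += 1
--         if j - i >= k:
--             return t[i]
--         i = j
--     return None
-- ===== Notes on version B (the rewrite author's own statement) =====
-- stated objective: alternative
-- what changed: Replaces A's per-element counter with last_item/count state by a two-pointer scan that skips whole maximal runs: the inner pointer finds the end of the run starting at i, the run length is compared to k, and i jumps to the next run.
import Mathlib
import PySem

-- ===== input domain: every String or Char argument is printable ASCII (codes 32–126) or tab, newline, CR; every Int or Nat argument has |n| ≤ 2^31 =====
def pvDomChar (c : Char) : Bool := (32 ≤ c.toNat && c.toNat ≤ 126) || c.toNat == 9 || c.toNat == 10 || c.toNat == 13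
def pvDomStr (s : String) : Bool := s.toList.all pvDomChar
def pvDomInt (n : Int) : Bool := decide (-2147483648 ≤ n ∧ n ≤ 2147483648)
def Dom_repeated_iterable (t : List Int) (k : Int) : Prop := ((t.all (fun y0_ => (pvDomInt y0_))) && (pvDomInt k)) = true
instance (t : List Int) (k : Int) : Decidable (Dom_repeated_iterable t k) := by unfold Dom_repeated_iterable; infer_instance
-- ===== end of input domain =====

-- B replaces A's per-element last_item/count counter by a two-pointer scan that
-- skips whole maximal runs (alternative decomposition, same O(n) cost).
-- A raises IndexError on empty t (t[0]); B returns None there (excluded by Pre_).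

-- ===== PORT A =====
-- the for-loop over range(1, length): consumes t[1:] element by element, state (last_item, count)
def pvGoA : List Int → Int → Int → Int → Option Int
  | [], _, _, _ => none
  | c :: rest, last, count, k =>
    if c = last then
      (if count + 1 = k then some c else pvGoA rest last (count + 1) k)
    else pvGoA rest c 1 k

def repeated_iterable (t : List Int) (k : Int) : Option Int :=
  let last_item := (PySem.List.pyGet? t 0).getD 0   -- t[0]; Pre_ excludes t = [] (IndexError)
  pvGoA (t.drop 1) last_item 1 k

-- ===== PORT B =====
-- inner while: j advances while j < n and t[j] == x (fuel = a bound on the remaining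
-- iterations, only to make the recursion structural; t.length is always enough)
def pvInner (t : List Int) (x : Int) : Nat → Nat → Nat
  | 0, j => j
  | fuel + 1, j =>
    if j < t.length ∧ (PySem.List.pyGet? t (j : Int)).getD 0 = x then
      pvInner t x fuel (j + 1)
    else j

-- outer while: i jumps from run start to run start
def pvOuter (t : List Int) (k : Int) : Nat → Nat → Option Int
  | 0, _ => none
  | fuel + 1, i =>
    if i < t.length then
      let x := (PySem.List.pyGet? t (i : Int)).getD 0
      let j := pvInner t x t.length i
      if (j : Int) - (i : Int) ≥ k then some x else pvOuter t k fuel j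
    else none

def repeated_iterable_alt (t : List Int) (k : Int) : Option Int :=
  pvOuter t k (t.length + 1) 0

-- ===== PRECONDITION & SPEC =====
-- Pre_ excludes k ≤ 1 (A's assert fails) and empty t (A raises IndexError at t[0]).
def Pre_repeated_iterable (t : List Int) (k : Int) : Prop := t ≠ [] ∧ 1 < k
instance (t : List Int) (k : Int) : Decidable (Pre_repeated_iterable t k) := by
  unfold Pre_repeated_iterable; infer_instance

def pvWitness_repeated_iterable : List Int × Int := ([1, 1, 2], 2)

def Spec_repeated_iterable (t : List Int) (k : Int) (out : Option Int) : Prop := out = repeated_iterable_alt t k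
instance (t : List Int) (k : Int) (out : Option Int) : Decidable (Spec_repeated_iterable t k out) := by unfold Spec_repeated_iterable; infer_instance

-- ===== CLAIM (what is proved, stated in full; the proofs are below) =====
def Claim_equal_repeated_iterable : Prop := ∀ (t : List Int) (k : Int), Dom_repeated_iterable t k → Pre_repeated_iterable t k → Spec_repeated_iterable t k (repeated_iterable t k)

-- ===== LEMMAS AND PROOFS =====

-- reference: decompose t into maximal runs, return head of first run of length ≥ k
def pvSpec : List Int → Int → Option Int
  | [], _ => none
  | x :: xs, k =>
    if k ≤ 1 + ((xs.takeWhile (· = x)).length : Int) then some x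
    else pvSpec (xs.dropWhile (· = x)) k
termination_by t _ => t.length
decreasing_by
  have := List.length_dropWhile_le (p := fun y => decide (y = x)) (l := xs)
  simpa using Nat.lt_succ_of_le this

theorem pvGoA_eq (k : Int) : ∀ (l : List Int) (last c : Int), 1 ≤ c → c < k →
    pvGoA l last c k =
      if k ≤ c + ((l.takeWhile (· = last)).length : Int) then some last
      else pvSpec (l.dropWhile (· = last)) k := by
  intro l
  induction l with
  | nil =>
    intro last c _ hck
    rw [pvGoA, List.takeWhile_nil, List.dropWhile_nil, if_neg (by simp; omega), pvSpec]
  | cons a l' ih =>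
    intro last c hc hck
    by_cases ha : a = last
    · subst ha
      by_cases hk : c + 1 = k
      · have hA : pvGoA (a :: l') a c k = some a := by simp [pvGoA, hk]
        have hR : k ≤ c + (((a :: l').takeWhile (· = a)).length : Int) := by
          simp; omega
        rw [hA, if_pos hR]
      · have hA : pvGoA (a :: l') a c k = pvGoA l' a (c + 1) k := by simp [pvGoA, hk]
        have htw : ((a :: l').takeWhile (· = a)) = a :: l'.takeWhile (· = a) := by
          simp
        have hdw : ((a :: l').dropWhile (· = a)) = l'.dropWhile (· = a) := by
          simp
        rw [hA, ih a (c + 1) (by omega) (by omega), htw, hdw, List.length_cons,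
          show (c : Int) + ((l'.takeWhile (· = a)).length + 1 : Nat)
              = (c + 1) + ((l'.takeWhile (· = a)).length : Int) by push_cast; omega]
    · have hA : pvGoA (a :: l') last c k = pvGoA l' a 1 k := by simp [pvGoA, ha]
      have htw : ((a :: l').takeWhile (· = last)) = [] := by simp [ha]
      have hdw : ((a :: l').dropWhile (· = last)) = a :: l' := by simp [ha]
      rw [hA, htw, hdw, if_neg (by simp; omega), ih a 1 le_rfl (by omega), pvSpec]

theorem pvInner_eq (t : List Int) (x : Int) : ∀ (fuel j : Nat), t.length ≤ fuel + j →
    pvInner t x fuel j = j + ((t.drop j).takeWhile (· = x)).length := by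
  intro fuel
  induction fuel with
  | zero =>
    intro j hj
    rw [pvInner, List.drop_of_length_le (by omega), List.takeWhile_nil, List.length_nil]
    omega
  | succ fuel ih =>
    intro j hj
    rw [pvInner]
    by_cases hlt : j < t.length
    · have hdrop : t.drop j = t[j] :: t.drop (j + 1) := List.drop_eq_getElem_cons hlt
      by_cases hx : (PySem.List.pyGet? t (j : Int)).getD 0 = x
      · have hget : t[j] = x := by
          rw [PySem.List.pyGet?_natCast, List.getElem?_eq_getElem hlt] at hx
          simpa using hx
        rw [if_pos ⟨hlt, hx⟩, ih (j + 1) (by omega), hdrop, List.takeWhile_cons]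
        simp [hget]
        omega
      · have hget : ¬ (t[j] = x) := by
          rw [PySem.List.pyGet?_natCast, List.getElem?_eq_getElem hlt] at hx
          simpa using hx
        rw [if_neg (by tauto), hdrop, List.takeWhile_cons]
        simp [hget]
    · rw [if_neg (by tauto), List.drop_of_length_le (by omega), List.takeWhile_nil,
        List.length_nil]
      omega

theorem pvOuter_eq (k : Int) (t : List Int) : ∀ (fuel i : Nat), t.length < fuel + i →
    pvOuter t k fuel i = pvSpec (t.drop i) k := by
  intro fuel
  induction fuel with
  | zero =>
    intro i hi
    rw [pvOuter, List.drop_of_length_le (by omega), pvSpec]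
  | succ fuel ih =>
    intro i hi
    rw [pvOuter]
    by_cases hlt : i < t.length
    · rw [if_pos hlt]
      have hx : (PySem.List.pyGet? t (i : Int)).getD 0 = t[i] := by
        rw [PySem.List.pyGet?_natCast, List.getElem?_eq_getElem hlt]; rfl
      have hdrop : t.drop i = t[i] :: t.drop (i + 1) := List.drop_eq_getElem_cons hlt
      have hrun : pvInner t ((PySem.List.pyGet? t (i : Int)).getD 0) t.length i
          = i + 1 + ((t.drop (i + 1)).takeWhile (· = t[i])).length := by
        rw [hx, pvInner_eq t t[i] t.length i (by omega), hdrop, List.takeWhile_cons]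
        simp
        omega
      rw [hdrop, pvSpec]
      set L := ((t.drop (i + 1)).takeWhile (· = t[i])).length with hL
      by_cases hcond : ((pvInner t ((PySem.List.pyGet? t (i : Int)).getD 0) t.length i : Int)
          - (i : Int) ≥ k)
      · rw [if_pos hcond, hx]
        rw [hrun] at hcond
        rw [if_pos (by push_cast at hcond ⊢; omega)]
      · rw [if_neg hcond]
        rw [hrun] at hcond
        rw [if_neg (by push_cast at hcond ⊢; omega), hrun,
          ih (i + 1 + L) (by omega)]
        congr 1
        have hsplit : (t.drop (i + 1)).takeWhile (· = t[i]) ++ (t.drop (i + 1)).dropWhile (· = t[i])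
            = t.drop (i + 1) := List.takeWhile_append_dropWhile
        calc t.drop (i + 1 + L)
            = (t.drop (i + 1)).drop L := by
              rw [List.drop_drop]
          _ = ((t.drop (i + 1)).takeWhile (· = t[i]) ++ (t.drop (i + 1)).dropWhile (· = t[i])).drop L := by
              rw [hsplit]
          _ = (t.drop (i + 1)).dropWhile (· = t[i]) := by
              rw [hL, List.drop_left]
    · rw [if_neg hlt, List.drop_of_length_le (by omega), pvSpec]

-- ===== VERDICT (by name: the statement is the Claim_ definition above) =====
theorem repeated_iterable_spec : Claim_equal_repeated_iterable := by
  intro t k _ hpre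
  obtain ⟨hne, hk⟩ := hpre
  obtain ⟨x, xs, rfl⟩ := List.exists_cons_of_ne_nil hne
  unfold Spec_repeated_iterable repeated_iterable repeated_iterable_alt
  simp only [List.length_cons]
  rw [pvOuter_eq k (x :: xs) (xs.length + 1 + 1) 0 (by simp)]
  simp only [List.drop_zero, PySem.List.pyGet?_zero_cons, Option.getD_some, List.drop_succ_cons]
  rw [pvGoA_eq k xs x 1 le_rfl hk, pvSpec]
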